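-- pv_equiv track=rewrite | github.com/goodkiwillc/toolbelt | good_toolbelt/utilities/collections.py | tuple_get_common_suffix
-- ===== SOURCE A (Python) =====
-- def tuple_get_common_suffix(lst: list[tuple]) -> list[tuple]:
--     # Get the minimum length of a tuple in the list
--     min_length = min([len(tpl) for tpl in lst])
--
--     # Find the common suffix by iterating through the elements
--     # of each tuple in reverse order and comparing them
--     common_suffix = []
--     for i in range(min_length):
--         element = lst[0][-i - 1]
--         common = True
--         for tuple in lst:
--             if tuple[-i - 1] != element:
--                 common = False
--                 break
--         if common:
--             common_suffix.append(element)
--         else: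
--             break
--
--     # Reverse the common suffix list to get it
--     # in the correct order
--     common_suffix.reverse()
--
--     return common_suffix
-- ===== SOURCE B (Python) =====
-- def tuple_get_common_suffix(lst: list[tuple]) -> list[tuple]:
--     # Fold: keep the running common suffix, reversed, and trim it against
--     # each remaining tuple (common prefix of the reversed sequences).
--     rev = list(lst[0][::-1])
--     for t in lst[1:]:
--         rt = t[::-1]
--         i = 0
--         while i < len(rev) and i < len(rt) and rev[i] == rt[i]:
--             i += 1
--         rev = rev[:i]
--     return rev[::-1]
-- ===== Notes on version B (the rewrite author's own statement) =====
-- stated objective: alternative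
-- what changed: A scans suffix positions outermost with an inner pass over all tuples per position; B folds over the tuples once, maintaining the shrinking common suffix (as a reversed prefix) and trimming it against each tuple.
-- outside the precondition, e.g. on tuple_get_common_suffix([]): A raises ValueError, B raises IndexError
import Mathlib
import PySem

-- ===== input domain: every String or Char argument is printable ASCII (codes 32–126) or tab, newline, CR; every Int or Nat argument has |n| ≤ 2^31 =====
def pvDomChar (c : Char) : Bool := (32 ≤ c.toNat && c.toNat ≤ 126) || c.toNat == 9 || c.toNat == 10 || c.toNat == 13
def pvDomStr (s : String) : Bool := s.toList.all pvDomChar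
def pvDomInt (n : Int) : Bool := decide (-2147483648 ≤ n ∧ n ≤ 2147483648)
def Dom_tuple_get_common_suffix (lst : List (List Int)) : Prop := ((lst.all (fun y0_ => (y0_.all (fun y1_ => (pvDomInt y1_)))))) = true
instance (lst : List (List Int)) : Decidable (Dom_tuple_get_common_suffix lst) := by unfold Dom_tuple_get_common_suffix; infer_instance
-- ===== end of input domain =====

-- B replaces A's index-based scan (outer loop over positions, inner scan over all tuples)
-- by a fold over the tuples that maintains the shrinking common suffix (objective: alternative).

-- ===== PORT A =====
-- the outer 'for i in range(min_length)' with its early break; acc is common_suffix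
def pvALoop (lst : List (List Int)) (first : List Int) (minLen : Nat)
    (i : Nat) (acc : List Int) : List Int :=
  if _h : i < minLen then
    let element := (PySem.List.pyGet? first (-(i : Int) - 1)).getD 0
    -- inner 'for tuple in lst' computing the flag 'common' (early break ≡ all)
    if lst.all (fun t => ((PySem.List.pyGet? t (-(i : Int) - 1)).getD 0) == element) then
      pvALoop lst first minLen (i + 1) (acc ++ [element])
    else acc
  else acc
termination_by minLen - i

def tuple_get_common_suffix (lst : List (List Int)) : List Int :=
  let minLen : Nat :=
    ((PySem.List.min? (lst.map (fun t => (t.length : Int))) id).getD 0).toNat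
  (pvALoop lst (lst.headD []) minLen 0 []).reverse

-- ===== PORT B =====
-- the while loop of Source B: number of equal leading elements of the two reversed lists
def pvMatchLen : List Int → List Int → Nat
  | x :: xs, y :: ys => if x == y then pvMatchLen xs ys + 1 else 0
  | _, _ => 0

def tuple_get_common_suffix_alt (lst : List (List Int)) : List Int :=
  match lst with
  | [] => []  -- unreachable under Pre_ (Source B raises IndexError on lst[0])
  | h :: t =>
    (t.foldl (fun rev u =>
        let rt := u.reverse
        rev.take (pvMatchLen rev rt)) h.reverse).reverse

-- ===== PRECONDITION & SPEC =====
-- Pre_ excludes only the empty list, on which A's min([]) raises ValueError.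
def Pre_tuple_get_common_suffix (lst : List (List Int)) : Prop := lst ≠ []
instance (lst : List (List Int)) : Decidable (Pre_tuple_get_common_suffix lst) := by
  unfold Pre_tuple_get_common_suffix; infer_instance
def pvWitness_tuple_get_common_suffix : List (List Int) := [[1, 2, 3], [2, 3]]

def Spec_tuple_get_common_suffix (lst : List (List Int)) (out : List Int) : Prop := out = tuple_get_common_suffix_alt lst
instance (lst : List (List Int)) (out : List Int) : Decidable (Spec_tuple_get_common_suffix lst out) := by unfold Spec_tuple_get_common_suffix; infer_instance

-- ===== CLAIM (what is proved, stated in full; the proofs are below) =====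
def Claim_equal_tuple_get_common_suffix : Prop := ∀ (lst : List (List Int)), Dom_tuple_get_common_suffix lst → Pre_tuple_get_common_suffix lst → Spec_tuple_get_common_suffix lst (tuple_get_common_suffix lst)

-- ===== LEMMAS AND PROOFS =====

-- common reference: g rh rts = longest common prefix of rh and all members of rts
def pvG : List Int → List (List Int) → List Int
  | [], _ => []
  | x :: xs, rts =>
    if rts.all (fun r => r.head? == some x) then x :: pvG xs (rts.map List.tail) else []

-- B's trim step is the two-list common prefix
def pvCp : List Int → List Int → List Int
  | x :: xs, y :: ys => if x == y then x :: pvCp xs ys else []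
  | _, _ => []

lemma take_matchLen_eq_cp (a b : List Int) : a.take (pvMatchLen a b) = pvCp a b := by
  induction a generalizing b with
  | nil => cases b <;> simp [pvMatchLen, pvCp]
  | cons x xs ih =>
    cases b with
    | nil => simp [pvMatchLen, pvCp]
    | cons y ys =>
      by_cases h : x = y <;> simp [pvMatchLen, pvCp, h, ih]

lemma pvG_nil_rts (rh : List Int) : pvG rh [] = rh := by
  induction rh with
  | nil => rfl
  | cons x xs ih => simp [pvG, ih]

lemma pvG_cons (rh r rest) : pvG rh (r :: rest) = pvG (pvCp rh r) rest := by
  induction rh generalizing r rest with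
  | nil => cases r <;> simp [pvG, pvCp]
  | cons x xs ih =>
    cases r with
    | nil => simp [pvG, pvCp]
    | cons y ys =>
      by_cases h : x = y
      · subst h
        by_cases hall : rest.all (fun r => r.head? == some x)
        · simp [pvG, pvCp, hall, ih]
        · simp [pvG, pvCp, hall]
      · simp [pvG, pvCp, h, Ne.symm h]

lemma foldl_cp_eq_pvG (rts : List (List Int)) (rh : List Int) :
    rts.foldl pvCp rh = pvG rh rts := by
  induction rts generalizing rh with
  | nil => simp [pvG_nil_rts]
  | cons r rest ih => simp [List.foldl_cons, ih, pvG_cons]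

lemma pvG_self_cons (xs : List Int) (rts : List (List Int)) :
    pvG xs (xs :: rts) = pvG xs rts := by
  rw [pvG_cons]
  have : pvCp xs xs = xs := by
    induction xs with
    | nil => rfl
    | cons x xs ih => simp [pvCp, ih]
  rw [this]

lemma pyGet_rev (t : List Int) (i : Nat) (h : i < t.length) :
    PySem.List.pyGet? t (-(i : Int) - 1) = t.reverse[i]? := by
  have h1 : (-(i : Int) - 1) = -((i + 1 : Nat) : Int) := by push_cast; ring
  rw [h1, PySem.List.pyGet?_neg_natCast t (i + 1) (by omega) (by omega),
      List.getElem?_reverse (by simpa using h)]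
  congr 1
  omega

lemma pvG_empty_of_short (rh : List Int) (rts : List (List Int)) (r : List Int)
    (hr : r ∈ rts) (hre : r = []) : pvG rh rts = [] := by
  cases rh with
  | nil => rfl
  | cons x xs =>
    have : rts.all (fun r => r.head? == some x) = false := by
      refine List.all_eq_false.mpr ⟨r, hr, by simp [hre]⟩
    simp [pvG, this]

lemma pvALoop_eq_pvG (lst : List (List Int)) (h : List Int) (minLen : Nat)
    (hmem : h ∈ lst)
    (hmin : ∀ r ∈ lst, minLen ≤ r.length)
    (hatt : ∃ r ∈ lst, r.length = minLen) :
    ∀ k i acc, minLen - i = k →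
      pvALoop lst h minLen i acc =
        acc ++ pvG (h.reverse.drop i) ((lst.map List.reverse).map (List.drop i)) := by
  intro k
  induction k with
  | zero =>
    intro i acc hk
    have hge : ¬ i < minLen := by omega
    rw [pvALoop]
    simp only [hge, dite_false]
    obtain ⟨r, hr, hlen⟩ := hatt
    have hre : r.reverse.drop i = [] := by
      simp [List.drop_eq_nil_iff]; omega
    rw [pvG_empty_of_short _ _ (r.reverse.drop i)
      (by exact List.mem_map.mpr ⟨r.reverse, List.mem_map.mpr ⟨r, hr, rfl⟩, rfl⟩) hre]
    simp
  | succ k ih =>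
    intro i acc hk
    have hlt : i < minLen := by omega
    have hih : i < h.reverse.length := by simpa using lt_of_lt_of_le hlt (hmin h hmem)
    have hdrop : List.drop i h.reverse = h.reverse[i] :: List.drop (i + 1) h.reverse :=
      (List.getElem_cons_drop hih).symm
    have helem : (PySem.List.pyGet? h (-(i : Int) - 1)).getD 0 = h.reverse[i] := by
      rw [pyGet_rev h i (by simpa using hih), List.getElem?_eq_getElem hih, Option.getD_some]
    have hQ : ∀ t ∈ lst, (((PySem.List.pyGet? t (-(i : Int) - 1)).getD 0) == h.reverse[i])
        = ((List.drop i t.reverse).head? == some h.reverse[i]) := by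
      intro t ht
      have hti : i < t.length := lt_of_lt_of_le hlt (hmin t ht)
      have htr : i < t.reverse.length := by simpa using hti
      rw [pyGet_rev t i hti, List.head?_drop, List.getElem?_eq_getElem htr]
      simp
    rw [pvALoop]
    simp only [hlt, ↓reduceDIte, helem]
    by_cases hc : lst.all (fun t => ((PySem.List.pyGet? t (-(i : Int) - 1)).getD 0) == h.reverse[i])
    case pos =>
      have hcR : ((lst.map List.reverse).map (List.drop i)).all
          (fun r => r.head? == some h.reverse[i]) = true := by
        simp only [List.all_map, Function.comp_def]
        rw [List.all_eq_true]
        intro t ht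
        rw [← hQ t ht]
        exact List.all_eq_true.mp hc t ht
      rw [if_pos hc, ih (i + 1) (acc ++ [h.reverse[i]]) (by omega), hdrop, pvG, if_pos hcR]
      have htails : (((lst.map List.reverse).map (List.drop i)).map List.tail)
          = (lst.map List.reverse).map (List.drop (i + 1)) := by
        simp only [List.map_map, Function.comp_def, List.tail_drop]
      rw [htails]
      simp
    case neg =>
      have hc' : lst.all (fun t => ((PySem.List.pyGet? t (-(i : Int) - 1)).getD 0) == h.reverse[i])
          = false := Bool.eq_false_iff.mpr hc
      have hcR : ((lst.map List.reverse).map (List.drop i)).all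
          (fun r => r.head? == some h.reverse[i]) = false := by
        obtain ⟨t, ht, hPt⟩ := List.all_eq_false.mp hc'
        refine List.all_eq_false.mpr ⟨List.drop i t.reverse,
          List.mem_map.mpr ⟨t.reverse, List.mem_map.mpr ⟨t, ht, rfl⟩, rfl⟩, ?_⟩
        rw [← hQ t ht]
        exact hPt
      rw [if_neg hc, hdrop, pvG]
      simp only [hcR, Bool.false_eq_true, if_false, List.append_nil]

-- ===== VERDICT (by name: the statement is the Claim_ definition above) =====
theorem tuple_get_common_suffix_spec : Claim_equal_tuple_get_common_suffix := by
  intro lst _ hpre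
  unfold Spec_tuple_get_common_suffix
  match lst with
  | [] => exact absurd rfl hpre
  | h :: t =>
    unfold tuple_get_common_suffix tuple_get_common_suffix_alt
    simp only [List.headD_cons]
    obtain ⟨m, hm⟩ : ∃ m, PySem.List.min? ((h :: t).map (fun t => (t.length : Int))) id = some m := by
      cases he : PySem.List.min? ((h :: t).map (fun t => (t.length : Int))) id with
      | none => exact absurd (((PySem.List.min?_eq_none_iff _ _).mp he)) (by simp)
      | some m => exact ⟨m, rfl⟩
    have hmmin := PySem.List.min?_isMin hm
    obtain ⟨r0, hr0, hr0len⟩ := List.mem_map.mp (PySem.List.min?_mem hm)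
    set minLen : Nat :=
      ((PySem.List.min? ((h :: t).map (fun t => (t.length : Int))) id).getD 0).toNat with hml
    have hmlv : minLen = r0.length := by rw [hml, hm]; simp [← hr0len]
    have hmin : ∀ r ∈ h :: t, minLen ≤ r.length := by
      intro r hr
      have h1 := hmmin ((r.length : Int)) (List.mem_map.mpr ⟨r, hr, rfl⟩)
      simp only [id] at h1
      omega
    rw [pvALoop_eq_pvG (h :: t) h minLen (by simp) hmin ⟨r0, hr0, hmlv.symm⟩
      minLen 0 [] (by omega)]
    simp only [List.nil_append, List.drop_zero]
    rw [show List.map (List.drop 0) (List.map List.reverse (h :: t))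
        = h.reverse :: t.map List.reverse from by simp, pvG_self_cons]
    have hstep : (fun (rev : List Int) (u : List Int) =>
        let rt := u.reverse
        rev.take (pvMatchLen rev rt)) = fun rev u => pvCp rev u.reverse := by
      funext rev u
      exact take_matchLen_eq_cp rev u.reverse
    rw [hstep]
    have hfm := List.foldl_map (l := t) (f := List.reverse) (g := pvCp) (init := h.reverse)
    rw [← hfm, foldl_cp_eq_pvG]
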